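-- pv_equiv track=rewrite | github.com/axelsmagichammer/A112509 | src/tools/add_common_sep_fields.py | extract_seps
-- ===== SOURCE A (Python) =====
-- def find_runs(s):
--     if not s:
--         return []
--     runs = []
--     cur = s[0]
--     cnt = 1
--     for c in s[1:]:
--         if c == cur:
--             cnt += 1
--         else:
--             runs.append((cur, cnt))
--             cur = c
--             cnt = 1
--     runs.append((cur, cnt))
--     return runs
--
-- def extract_seps(s):
--     """Return the list of separator (0-block) lengths between 1-blocks."""
--     runs = find_runs(s)
--     seps = []
--     i = 0
--     while i < len(runs):
--         ch, ln = runs[i]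
--         if ch == '1':
--             i += 1
--             if i < len(runs) and runs[i][0] == '0':
--                 seps.append(runs[i][1])
--                 i += 1
--         else:
--             break
--     return seps
-- ===== SOURCE B (Python) =====
-- def extract_seps(s):
--     """Return the list of separator (0-block) lengths between 1-blocks."""
--     seps = []
--     n = len(s)
--     i = 0
--     after_one = False
--     while i < n:
--         c = s[i]
--         j = i
--         while j < n and s[j] == c:
--             j += 1
--         if c == '1':
--             after_one = True
--         elif c == '0' and after_one:
--             seps.append(j - i)
--             after_one = False
--         else:
--             break
--         i = j
--     return seps
-- ===== Notes on version B (the rewrite author's own statement) =====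
-- stated objective: faster
-- what changed: Fused the full run-length-encoding pass and the index-driven while loop over the runs list into a single pass over the characters with an after-a-1-run flag; it stops scanning at the first run that breaks the 1/0 alternation and never builds the runs list.
import Mathlib
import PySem

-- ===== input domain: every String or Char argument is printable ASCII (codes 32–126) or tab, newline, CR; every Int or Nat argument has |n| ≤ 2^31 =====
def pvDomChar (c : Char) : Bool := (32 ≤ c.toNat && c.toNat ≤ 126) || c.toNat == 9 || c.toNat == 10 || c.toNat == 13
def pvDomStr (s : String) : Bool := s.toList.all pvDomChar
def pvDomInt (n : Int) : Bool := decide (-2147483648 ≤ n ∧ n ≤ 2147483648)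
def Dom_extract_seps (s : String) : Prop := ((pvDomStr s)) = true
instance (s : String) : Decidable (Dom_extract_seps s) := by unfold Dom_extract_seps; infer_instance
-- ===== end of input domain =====

-- B fuses A's two passes (build runs list, then scan it by index) into one pass over the
-- characters with an after-a-1-run flag; same values on every input; B exits at the first run that breaks the pattern (objective: faster, constant-factor).

-- ===== PORT A =====
-- find_runs: fold over s[1:] with state (runs, cur, cnt), appending (cur,cnt) at boundaries
def pvStep (st : List (Char × Int) × Char × Int) (c : Char) : List (Char × Int) × Char × Int :=
  let (runs, cur, cnt) := st
  if c = cur then (runs, cur, cnt + 1) else (runs ++ [(cur, cnt)], c, 1)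

def pvFindRuns (cs : List Char) : List (Char × Int) :=
  match cs with
  | [] => []
  | c0 :: rest =>
    let st := rest.foldl pvStep ([], c0, 1)
    st.1 ++ [(st.2.1, st.2.2)]

-- A's while loop over the runs list (index i becomes the remaining suffix)
def pvLoopA : List (Char × Int) → List Int
  | [] => []
  | (ch, _) :: rest =>
    if ch = '1' then
      match rest with
      | [] => []
      | (c2, l2) :: rest2 => if c2 = '0' then l2 :: pvLoopA rest2 else pvLoopA ((c2, l2) :: rest2)
    else []
  termination_by rs => rs.length
  decreasing_by all_goals (simp; try omega)

def extract_seps (s : String) : List Int := pvLoopA (pvFindRuns s.toList)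

-- ===== PORT B =====
-- inner while of Source B: length of the leading run of c in xs (beyond the first char), and the rest
def pvRunLen (c : Char) : List Char → Nat × List Char
  | [] => (0, [])
  | x :: xs => if x = c then let p := pvRunLen c xs; (p.1 + 1, p.2) else (0, x :: xs)

theorem pvRunLen_length_le (c : Char) (xs : List Char) : (pvRunLen c xs).2.length ≤ xs.length := by
  induction xs with
  | nil => simp [pvRunLen]
  | cons x xs ih =>
    simp only [pvRunLen]
    split
    · exact Nat.le_succ_of_le ih
    · simp

-- Source B's single while loop: consume one run per step, thread the after_one flag
def pvLoopB : List Char → Bool → List Int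
  | [], _ => []
  | c :: xs, afterOne =>
    let p := pvRunLen c xs
    if c = '1' then pvLoopB p.2 true
    else if c = '0' ∧ afterOne then ((p.1 : Int) + 1) :: pvLoopB p.2 false
    else []
  termination_by cs _ => cs.length
  decreasing_by
    · exact Nat.lt_succ_of_le (pvRunLen_length_le c xs)
    · exact Nat.lt_succ_of_le (pvRunLen_length_le c xs)

def extract_seps_alt (s : String) : List Int := pvLoopB s.toList false

-- ===== PRECONDITION & SPEC =====
def Spec_extract_seps (s : String) (out : List Int) : Prop := out = extract_seps_alt s
instance (s : String) (out : List Int) : Decidable (Spec_extract_seps s out) := by unfold Spec_extract_seps; infer_instance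

-- ===== CLAIM (what is proved, stated in full; the proofs are below) =====
def Claim_equal_extract_seps : Prop := ∀ (s : String), Dom_extract_seps s → Spec_extract_seps s (extract_seps s)

-- ===== LEMMAS AND PROOFS =====

-- reference run decomposition (proof-only): runs of cs via pvRunLen
def pvRunsOf : List Char → List (Char × Int)
  | [] => []
  | c :: xs =>
    let p := pvRunLen c xs
    (c, (p.1 : Int) + 1) :: pvRunsOf p.2
  termination_by cs => cs.length
  decreasing_by exact Nat.lt_succ_of_le (pvRunLen_length_le c xs)

-- pvLoopB processed run-by-run equals the same state machine on the runs list
def pvLoopB' : List (Char × Int) → Bool → List Int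
  | [], _ => []
  | (c, n) :: rs, afterOne =>
    if c = '1' then pvLoopB' rs true
    else if c = '0' ∧ afterOne then n :: pvLoopB' rs false
    else []

theorem pvLoopB_eq_loopB' (cs : List Char) (a : Bool) :
    pvLoopB cs a = pvLoopB' (pvRunsOf cs) a := by
  induction cs using pvRunsOf.induct generalizing a with
  | case1 => simp [pvLoopB, pvRunsOf, pvLoopB']
  | case2 c xs p ih =>
    rw [pvLoopB, pvRunsOf]
    simp only [pvLoopB']
    split
    · exact ih true
    · split
      · exact congrArg _ (ih false)
      · rfl

-- the flag state machine agrees with A's index loop: both statements together by induction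
-- A's behaviour right after a consumed '1' run (proof helper)
def pvAfterOne : List (Char × Int) → List Int
  | [] => []
  | (c, n) :: rest => if c = '0' then n :: pvLoopA rest else pvLoopA ((c, n) :: rest)

theorem pvLoopB'_eq_loopA (rs : List (Char × Int)) :
    pvLoopB' rs false = pvLoopA rs ∧ pvLoopB' rs true = pvAfterOne rs := by
  induction rs with
  | nil => simp [pvLoopB', pvLoopA, pvAfterOne]
  | cons p rest ih =>
    obtain ⟨c, n⟩ := p
    constructor
    · by_cases h1 : c = '1'
      · rw [show pvLoopB' ((c, n) :: rest) false = pvLoopB' rest true by simp [pvLoopB', h1]]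
        rw [ih.2, h1, pvLoopA.eq_def]
        match rest with
        | [] => simp [pvAfterOne]
        | (c2, l2) :: rest2 => by_cases h2 : c2 = '0' <;> simp [pvAfterOne, h2]
      · rw [pvLoopA.eq_def]
        simp [pvLoopB', h1]
    · by_cases h1 : c = '1'
      · have hne : c ≠ '0' := by rw [h1]; decide
        rw [show pvLoopB' ((c, n) :: rest) true = pvLoopB' rest true by simp [pvLoopB', h1]]
        rw [ih.2]
        conv_rhs => rw [pvAfterOne.eq_def]
        simp only [hne, if_false]
        rw [h1, pvLoopA.eq_def]
        match rest with
        | [] => simp [pvAfterOne]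
        | (c2, l2) :: rest2 => by_cases h2 : c2 = '0' <;> simp [pvAfterOne, h2]
      · by_cases h0 : c = '0'
        · subst h0
          simp [pvLoopB', pvAfterOne, ih.1]
        · rw [pvAfterOne.eq_def]
          simp only [h0, if_false]
          rw [pvLoopA.eq_def]
          simp [pvLoopB', h1, h0]

-- finishing A's fold from state (runs, cur, cnt) yields runs ++ the run decomposition
theorem pvFindRuns_fold (xs : List Char) (runs : List (Char × Int)) (cur : Char) (cnt : Int) :
    (xs.foldl pvStep (runs, cur, cnt)).1 ++
        [((xs.foldl pvStep (runs, cur, cnt)).2.1, (xs.foldl pvStep (runs, cur, cnt)).2.2)] =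
      runs ++ (cur, cnt + ((pvRunLen cur xs).1 : Int)) :: pvRunsOf (pvRunLen cur xs).2 := by
  induction xs generalizing runs cur cnt with
  | nil => simp [pvRunLen, pvRunsOf]
  | cons x xs ih =>
    by_cases h : x = cur
    · rw [List.foldl_cons, show pvStep (runs, cur, cnt) x = (runs, cur, cnt + 1) by simp [pvStep, h]]
      rw [ih runs cur (cnt + 1)]
      rw [show pvRunLen cur (x :: xs) = ((pvRunLen cur xs).1 + 1, (pvRunLen cur xs).2) by
        simp [pvRunLen, h]]
      congr 3
      push_cast
      ring
    · rw [List.foldl_cons, show pvStep (runs, cur, cnt) x = (runs ++ [(cur, cnt)], x, 1) by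
        simp [pvStep, h]]
      rw [ih (runs ++ [(cur, cnt)]) x 1]
      rw [show pvRunLen cur (x :: xs) = (0, x :: xs) by simp [pvRunLen, h]]
      rw [pvRunsOf]
      simp only [List.append_assoc, List.singleton_append]
      rw [show cnt + ((0 : Nat) : Int) = cnt from by simp]
      rw [show (1 : Int) + ((pvRunLen x xs).1 : Int) = ((pvRunLen x xs).1 : Int) + 1 from by omega]

theorem pvFindRuns_eq_runsOf (cs : List Char) : pvFindRuns cs = pvRunsOf cs := by
  match cs with
  | [] => simp [pvFindRuns, pvRunsOf]
  | c0 :: rest =>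
    rw [pvFindRuns]
    have h := pvFindRuns_fold rest [] c0 1
    simp only [List.nil_append] at h
    rw [h, pvRunsOf]
    simp [Int.add_comm]

-- ===== VERDICT (by name: the statement is the Claim_ definition above) =====
theorem extract_seps_spec : Claim_equal_extract_seps := by
  intro s _
  unfold Spec_extract_seps extract_seps extract_seps_alt
  rw [pvFindRuns_eq_runsOf, pvLoopB_eq_loopB', ← (pvLoopB'_eq_loopA (pvRunsOf s.toList)).1]
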